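-- pv_equiv track=rewrite | github.com/cirosantilli/project-euler-solvers | solvers/452.py | ways_to_place
-- ===== SOURCE A (Python) =====
-- from math import isqrt, gcd
--
-- def ways_to_place(n: int, pattern: tuple) -> int:
--     """
--     Number of ordered n-tuples corresponding to a multiplicity pattern.
--
--     Let k = sum(pattern).
--     We place k non-1 entries into n positions (ordered), with repeats according
--     to multiplicities in pattern, and remaining n-k entries are 1.
--
--     Count = n! / (n-k)! / Π (mi!)
--           = falling_factorial(n, k) / Π (mi!)
--
--     Since MOD is not prime, we compute exactly as integers using gcd cancellation,
--     then take modulo at the end.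
--     """
--     k = sum(pattern)
--     if k == 0:
--         return 1
--
--     numerators = [n - i for i in range(k)]
--
--     # Precompute small factorials up to 29 (enough for this problem)
--     # factorial(x) small, exact division guaranteed.
--     for mi in pattern:
--         d = 1
--         for t in range(2, mi + 1):
--             d *= t
--         # Cancel d against the numerator factors
--         for i in range(len(numerators)):
--             if d == 1:
--                 break
--             g = gcd(numerators[i], d)
--             if g > 1:
--                 numerators[i] //= g
--                 d //= g
--         # Extra pass (rarely needed)
--         if d != 1:
--             for i in range(len(numerators)):
--                 if d == 1:
--                     break
--                 g = gcd(numerators[i], d)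
--                 if g > 1:
--                     numerators[i] //= g
--                     d //= g
--
--         assert d == 1, "Exact cancellation failed (should never happen)."
--
--     res = 1
--     for v in numerators:
--         res *= v
--     return res
-- ===== SOURCE B (Python) =====
-- def ways_to_place(n: int, pattern: tuple) -> int:
--     k = sum(pattern)
--     if k == 0:
--         return 1
--     num = 1
--     for i in range(k):
--         num *= n - i
--     den = 1
--     for mi in pattern:
--         f = 1
--         for t in range(2, mi + 1):
--             f *= t
--         den *= f
--     return num // den
-- ===== Notes on version B (the rewrite author's own statement) =====
-- stated objective: simpler
-- what changed: B drops the per-factorial gcd-cancellation passes over a mutable numerator list entirely and instead accumulates two integers, the falling-factorial numerator and the product of factorials, returning their single exact floor division.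
-- outside the precondition, e.g. on ways_to_place(3, (3, -1)): A returns 1, B returns 1
import Mathlib
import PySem

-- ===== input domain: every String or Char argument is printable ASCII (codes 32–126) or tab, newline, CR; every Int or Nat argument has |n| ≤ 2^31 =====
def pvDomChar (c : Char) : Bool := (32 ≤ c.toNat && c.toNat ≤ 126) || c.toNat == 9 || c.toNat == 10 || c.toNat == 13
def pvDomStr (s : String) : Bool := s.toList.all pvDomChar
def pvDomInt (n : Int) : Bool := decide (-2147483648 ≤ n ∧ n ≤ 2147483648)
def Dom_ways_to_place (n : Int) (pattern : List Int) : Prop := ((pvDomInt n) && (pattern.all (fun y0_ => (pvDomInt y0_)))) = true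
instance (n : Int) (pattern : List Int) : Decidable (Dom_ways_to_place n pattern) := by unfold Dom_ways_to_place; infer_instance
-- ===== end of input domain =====

-- B replaces A's gcd-cancellation passes over a numerator list by two accumulated
-- products and one exact floor division (objective: simpler).

-- ===== PORT A =====
-- d = 1; for t in range(2, mi+1): d *= t
def wpFact (mi : Int) : Int :=
  (PySem.List.pyRange 2 (mi + 1) 1).foldl (fun d t => d * t) 1

-- for i in range(len(numerators)): if d == 1: break; g = gcd(numerators[i], d);
--   if g > 1: numerators[i] //= g; d //= g      (rebuilt structurally, same values)
def wpCancel : List Int → Int → List Int × Int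
  | [], d => ([], d)
  | h :: t, d =>
    if d = 1 then (h :: t, d)
    else
      let g : Int := (Int.gcd h d : Int)
      if 1 < g then
        let r := wpCancel t (PySem.Int.floordiv d g)
        (PySem.Int.floordiv h g :: r.1, r.2)
      else
        let r := wpCancel t d
        (h :: r.1, r.2)

-- one iteration of A's `for mi in pattern` body; Python's final `assert d == 1`
-- raises where it fails — those inputs are exactly the ones Pre_ excludes
def wpStep (nums : List Int) (mi : Int) : List Int :=
  let p1 := wpCancel nums (wpFact mi)
  if p1.2 ≠ 1 then (wpCancel p1.1 p1.2).1 else p1.1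

def ways_to_place (n : Int) (pattern : List Int) : Int :=
  let k := pattern.sum
  if k = 0 then 1
  else
    let numerators := (PySem.List.pyRange 0 k 1).map (fun i => n - i)
    let final := pattern.foldl wpStep numerators
    final.foldl (fun res v => res * v) 1

-- ===== PORT B =====
def ways_to_place_alt (n : Int) (pattern : List Int) : Int :=
  let k := pattern.sum
  if k = 0 then 1
  else
    let num := (PySem.List.pyRange 0 k 1).foldl (fun a i => a * (n - i)) 1
    let den := pattern.foldl
      (fun a mi => a * ((PySem.List.pyRange 2 (mi + 1) 1).foldl (fun f t => f * t) 1)) 1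
    PySem.Int.floordiv num den

-- ===== PRECONDITION & SPEC =====
-- Pre_ admits: k = 0; a zero numerator factor (0 ≤ n < k, count 0); all multiplicities
-- nonnegative (the function's natural domain); or a negative-sum pattern of entries ≤ 1.
-- Outside it (a negative entry alongside a positive total, without a zero factor) A's
-- exact-cancellation `assert d == 1` can fail and raise AssertionError; on the few
-- excluded inputs where A still returns, B returns the same value (cited in claim.json).
def Pre_ways_to_place (n : Int) (pattern : List Int) : Prop :=
  pattern.sum = 0 ∨
    (0 ≤ n ∧ n < pattern.sum) ∨
    (0 < pattern.sum ∧ ∀ mi ∈ pattern, 0 ≤ mi) ∨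
    (pattern.sum < 0 ∧ ∀ mi ∈ pattern, mi ≤ 1)

instance (n : Int) (pattern : List Int) : Decidable (Pre_ways_to_place n pattern) := by
  unfold Pre_ways_to_place; infer_instance

def pvWitness_ways_to_place : Int × List Int := (5, [2])

def Spec_ways_to_place (n : Int) (pattern : List Int) (out : Int) : Prop := out = ways_to_place_alt n pattern
instance (n : Int) (pattern : List Int) (out : Int) : Decidable (Spec_ways_to_place n pattern out) := by unfold Spec_ways_to_place; infer_instance

-- ===== CLAIM (what is proved, stated in full; the proofs are below) =====
def Claim_equal_ways_to_place : Prop := ∀ (n : Int) (pattern : List Int), Dom_ways_to_place n pattern → Pre_ways_to_place n pattern → Spec_ways_to_place n pattern (ways_to_place n pattern)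

-- ===== LEMMAS AND PROOFS =====

lemma foldl_mul_pos : ∀ (l : List Int) (c : Int), 0 < c → (∀ x ∈ l, 0 < x) →
    0 < l.foldl (fun a x => a * x) c := by
  intro l
  induction l with
  | nil => intro c hc _; simpa using hc
  | cons h t ih =>
      intro c hc hmem
      simp only [List.foldl_cons]
      exact ih _ (mul_pos hc (hmem h (by simp))) (fun x hx => hmem x (by simp [hx]))

lemma wpFact_pos (mi : Int) : 0 < wpFact mi := by
  unfold wpFact
  apply foldl_mul_pos _ _ one_pos
  intro x hx
  have := (PySem.List.mem_pyRange_one.mp hx).1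
  omega

-- key arithmetic fact: if d | h*P then after cancelling gcd(h,d) out of d, it divides P
lemma nat_div_gcd_dvd (d h P : Nat) (hd : 0 < d) (hdvd : d ∣ h * P) :
    d / Nat.gcd h d ∣ P := by
  have h1 : d ∣ Nat.gcd (d * P) (h * P) := Nat.dvd_gcd (dvd_mul_right d P) hdvd
  rw [Nat.gcd_mul_right] at h1
  rw [Nat.gcd_comm d h] at h1
  have hgd : Nat.gcd h d ∣ d := Nat.gcd_dvd_right h d
  have hg0 : 0 < Nat.gcd h d := Nat.gcd_pos_of_pos_right h hd
  obtain ⟨c, hc⟩ := h1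
  refine ⟨c, ?_⟩
  apply Nat.eq_of_mul_eq_mul_left hg0
  calc Nat.gcd h d * P = d * c := hc
    _ = d / Nat.gcd h d * Nat.gcd h d * c := by rw [Nat.div_mul_cancel hgd]
    _ = Nat.gcd h d * (d / Nat.gcd h d * c) := by ring

lemma div_gcd_dvd (d h P : Int) (hd : 0 < d) (hdvd : d ∣ h * P) :
    d / (Int.gcd h d : Int) ∣ P := by
  have hnat : d.natAbs ∣ h.natAbs * P.natAbs := by
    rw [← Int.natAbs_mul]; exact Int.natAbs_dvd_natAbs.mpr hdvd
  have hd0 : 0 < d.natAbs := Int.natAbs_pos.mpr (ne_of_gt hd)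
  have h2 := nat_div_gcd_dvd d.natAbs h.natAbs P.natAbs hd0 hnat
  have hdeq : d = (d.natAbs : Int) := (Int.natAbs_of_nonneg hd.le).symm
  have hgeq : Int.gcd h d = Nat.gcd h.natAbs d.natAbs := rfl
  have hdiv : d / (Int.gcd h d : Int)
      = ((d.natAbs / Nat.gcd h.natAbs d.natAbs : Nat) : Int) := by
    rw [hgeq, Int.natCast_div, ← hdeq]
  rw [hdiv]
  exact dvd_trans (Int.natCast_dvd_natCast.mpr h2) (Int.natAbs_dvd.mpr dvd_rfl)

lemma wpCancel_spec : ∀ (nums : List Int) (d : Int), 0 < d → d ∣ nums.prod →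
    (wpCancel nums d).2 = 1 ∧ (wpCancel nums d).1.prod * d = nums.prod := by
  intro nums
  induction nums with
  | nil =>
      intro d hd hdvd
      simp only [List.prod_nil] at hdvd
      have h1 := Int.le_of_dvd one_pos hdvd
      have hd1 : d = 1 := by omega
      simp [wpCancel, hd1]
  | cons h t ih =>
      intro d hd hdvd
      rw [wpCancel]
      by_cases hd1 : d = 1
      · simp [hd1]
      · simp only [if_neg hd1]
        set g : Int := (Int.gcd h d : Int) with hg
        have hgh : g ∣ h := by rw [hg]; exact Int.gcd_dvd_left h d
        have hgd : g ∣ d := by rw [hg]; exact Int.gcd_dvd_right h d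
        have hg0 : 0 < g := by
          rw [hg]
          have hne : Int.gcd h d ≠ 0 := by
            intro h0
            have := Int.eq_zero_of_gcd_eq_zero_right h0
            omega
          exact_mod_cast Nat.pos_of_ne_zero hne
        rw [List.prod_cons] at hdvd
        by_cases hg1 : 1 < g
        · simp only [if_pos hg1]
          have hfd : PySem.Int.floordiv d g = d / g := PySem.Int.floordiv_eq_ediv_of_pos hg0
          have hfh : PySem.Int.floordiv h g = h / g := PySem.Int.floordiv_eq_ediv_of_pos hg0
          have e1 : h / g * g = h := Int.ediv_mul_cancel hgh
          have e2 : d / g * g = d := Int.ediv_mul_cancel hgd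
          have hd'pos : 0 < d / g := by
            by_contra hle
            have hle' : d / g ≤ 0 := not_lt.mp hle
            nlinarith [e2, hg0, hd, hle']
          have hd'dvd : d / g ∣ t.prod := div_gcd_dvd d h t.prod hd hdvd
          have hih := ih (d / g) hd'pos hd'dvd
          rw [hfd, hfh]
          refine ⟨hih.1, ?_⟩
          simp only [List.prod_cons]
          have hp := hih.2
          linear_combination ((wpCancel t (d / g)).1.prod * (d / g)) * e1
            - (h / g) * (wpCancel t (d / g)).1.prod * e2 + h * hp
        · simp only [if_neg hg1]
          have hgeq : Int.gcd h d = 1 := by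
            have : g = 1 := by omega
            rw [hg] at this; exact_mod_cast this
          have hcop : IsCoprime d h := by
            rw [Int.isCoprime_iff_gcd_eq_one, Int.gcd_comm]; exact hgeq
          have hdt : d ∣ t.prod := hcop.dvd_of_dvd_mul_left hdvd
          have hih := ih d hd hdt
          refine ⟨hih.1, ?_⟩
          simp only [List.prod_cons]
          rw [mul_assoc, hih.2]

lemma wpStep_spec (nums : List Int) (mi : Int) (hdvd : wpFact mi ∣ nums.prod) :
    (wpStep nums mi).prod * wpFact mi = nums.prod := by
  unfold wpStep
  have h := wpCancel_spec nums (wpFact mi) (wpFact_pos mi) hdvd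
  simp [h.1, h.2]

lemma wpFold_spec : ∀ (pat : List Int) (nums : List Int),
    (pat.map wpFact).prod ∣ nums.prod →
    (pat.foldl wpStep nums).prod * (pat.map wpFact).prod = nums.prod := by
  intro pat
  induction pat with
  | nil => intro nums _; simp
  | cons mi rest ih =>
      intro nums hdvd
      simp only [List.map_cons, List.prod_cons] at hdvd ⊢
      have hf0 : (0:Int) < wpFact mi := wpFact_pos mi
      have hfd : wpFact mi ∣ nums.prod :=
        dvd_trans (dvd_mul_right _ _) hdvd
      have hstep := wpStep_spec nums mi hfd
      have hrest : (rest.map wpFact).prod ∣ (wpStep nums mi).prod := by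
        obtain ⟨c, hc⟩ := hdvd
        refine ⟨c, ?_⟩
        apply mul_left_cancel₀ (ne_of_gt hf0)
        rw [mul_comm (wpFact mi) ((wpStep nums mi).prod), hstep, hc]
        ring
      simp only [List.foldl_cons]
      have hih := ih (wpStep nums mi) hrest
      calc (rest.foldl wpStep (wpStep nums mi)).prod * (wpFact mi * (rest.map wpFact).prod)
          = (rest.foldl wpStep (wpStep nums mi)).prod * (rest.map wpFact).prod * wpFact mi := by ring
        _ = (wpStep nums mi).prod * wpFact mi := by rw [hih]
        _ = nums.prod := hstep

lemma foldl_mul_eq_prod_map (l : List Int) (f : Int → Int) :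
    l.foldl (fun a x => a * f x) 1 = (l.map f).prod := by
  rw [List.prod_eq_foldl, List.foldl_map]

-- the falling factorial ∏_{i<k} (n - i) is the descending Pochhammer polynomial at n
lemma fall_eq_descPochhammer (n : Int) : ∀ (k : Nat),
    ((List.range k).map (fun (i : Nat) => n - (i : Int))).prod = Polynomial.eval n (descPochhammer ℤ k) := by
  intro k
  induction k with
  | zero => simp [descPochhammer_zero]
  | succ k ih =>
      rw [List.range_succ, List.map_append, List.prod_append,
        descPochhammer_succ_right (R := ℤ) k, Polynomial.eval_mul]
      simp [ih]

-- multinomial integrality, one factor: m! divides any product of m consecutive integers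
lemma factorial_dvd_fall (n : Int) (m : Nat) :
    ((m.factorial : Int)) ∣ ((List.range m).map (fun (i : Nat) => n - (i : Int))).prod := by
  rw [fall_eq_descPochhammer, Polynomial.eval_eq_smeval,
    Ring.descPochhammer_eq_factorial_smul_choose n m, Int.nsmul_eq_mul]
  exact Dvd.intro _ rfl

lemma fall_add (n : Int) (a b : Nat) :
    ((List.range (a + b)).map (fun (i : Nat) => n - (i : Int))).prod
      = ((List.range a).map (fun (i : Nat) => n - (i : Int))).prod
        * ((List.range b).map (fun (i : Nat) => (n - (a : Int)) - (i : Int))).prod := by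
  rw [List.range_add, List.map_append, List.prod_append, List.map_map]
  congr 1
  apply congrArg
  apply List.map_congr_left
  intro i _
  simp only [Function.comp_apply]
  push_cast
  ring

lemma wpFact_natCast : ∀ (m : Nat), wpFact (m : Int) = (m.factorial : Int) := by
  intro m
  induction m with
  | zero =>
      unfold wpFact
      rw [PySem.List.pyRange_one_eq_nil (by norm_num)]
      simp
  | succ m ih =>
      match m, ih with
      | 0, _ =>
          unfold wpFact
          rw [PySem.List.pyRange_one_eq_nil (by norm_num)]
          simp
      | Nat.succ m', ih =>
          unfold wpFact at ih ⊢
          have hcast : ((m' + 1 + 1 : Nat) : Int) + 1 = (((m' + 1 : Nat) : Int) + 1) + 1 := by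
            push_cast; ring
          rw [hcast, PySem.List.pyRange_one_succ_right (by push_cast; omega),
            List.foldl_append]
          rw [ih]
          simp only [List.foldl_cons, List.foldl_nil]
          have hf : (m' + 1 + 1).factorial = (m' + 1 + 1) * (m' + 1).factorial :=
            Nat.factorial_succ _
          rw [hf]
          push_cast
          ring

lemma nonneg_pattern_dvd : ∀ (pat : List Int), (∀ mi ∈ pat, 0 ≤ mi) → ∀ (n : Int),
    (pat.map wpFact).prod ∣ ((List.range pat.sum.toNat).map (fun (i : Nat) => n - (i : Int))).prod := by
  intro pat
  induction pat with
  | nil => intro _ n; simp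
  | cons mi rest ih =>
      intro hmem n
      have hmi : 0 ≤ mi := hmem mi (by simp)
      have hrest : 0 ≤ rest.sum := List.sum_nonneg (fun x hx => hmem x (by simp [hx]))
      have hsum : (mi :: rest).sum.toNat = mi.toNat + rest.sum.toNat := by
        simp only [List.sum_cons]; omega
      rw [hsum, fall_add, List.map_cons, List.prod_cons]
      apply mul_dvd_mul
      · have hw : wpFact mi = (mi.toNat.factorial : Int) := by
          conv_lhs => rw [show mi = (mi.toNat : Int) from (Int.toNat_of_nonneg hmi).symm]
          exact wpFact_natCast mi.toNat
        rw [hw]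
        exact factorial_dvd_fall n mi.toNat
      · have := ih (fun x hx => hmem x (by simp [hx])) (n - (mi.toNat : Int))
        exact this

lemma small_pattern_facts (pat : List Int) (h : ∀ mi ∈ pat, mi ≤ 1) :
    (pat.map wpFact).prod = 1 := by
  apply List.prod_eq_one
  intro x hx
  obtain ⟨mi, hmi, rfl⟩ := List.mem_map.mp hx
  unfold wpFact
  rw [PySem.List.pyRange_one_eq_nil (by have := h mi hmi; omega)]
  simp

-- nums as a falling-factorial product over List.range
lemma nums_eq_fall (n k : Int) :
    ((PySem.List.pyRange 0 k 1).map (fun i => n - i)).prod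
      = ((List.range k.toNat).map (fun (i : Nat) => n - (i : Int))).prod := by
  rw [PySem.List.pyRange_one, List.map_map]
  simp only [sub_zero]
  congr 1
  apply List.map_congr_left
  intro i _
  simp

-- under Pre_, the product of the pattern's factorials divides the falling factorial
lemma pre_dvd (n : Int) (pattern : List Int) (hk0 : pattern.sum ≠ 0)
    (hpre : Pre_ways_to_place n pattern) :
    (pattern.map wpFact).prod ∣ ((PySem.List.pyRange 0 pattern.sum 1).map (fun i => n - i)).prod := by
  rcases hpre with h0 | ⟨hn0, hnk⟩ | ⟨hk, hnn⟩ | ⟨hk, hle⟩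
  · exact absurd h0 hk0
  · -- 0 ≤ n < k: the factor n - n = 0 appears, the whole product is 0
    have hmem : (0 : Int) ∈ (PySem.List.pyRange 0 pattern.sum 1).map (fun i => n - i) :=
      List.mem_map.mpr ⟨n, PySem.List.mem_pyRange_one.mpr ⟨hn0, hnk⟩, by ring⟩
    rw [List.prod_eq_zero hmem]
    exact dvd_zero _
  · rw [nums_eq_fall]
    exact nonneg_pattern_dvd pattern hnn n
  · rw [PySem.List.pyRange_one_eq_nil (by omega)]
    simp [small_pattern_facts pattern hle]

-- ===== VERDICT (by name: the statement is the Claim_ definition above) =====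
theorem ways_to_place_spec : Claim_equal_ways_to_place := by
  intro n pattern _ hpre
  unfold Spec_ways_to_place ways_to_place ways_to_place_alt
  by_cases hk : pattern.sum = 0
  · simp [hk]
  · simp only [if_neg hk]
    set nums := (PySem.List.pyRange 0 pattern.sum 1).map (fun i => n - i) with hnums
    have hdvd : (pattern.map wpFact).prod ∣ nums.prod := pre_dvd n pattern hk hpre
    have hfold := wpFold_spec pattern nums hdvd
    have hden : pattern.foldl
        (fun a mi => a * ((PySem.List.pyRange 2 (mi + 1) 1).foldl (fun f t => f * t) 1)) 1
        = (pattern.map wpFact).prod := by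
      rw [foldl_mul_eq_prod_map]; rfl
    have hnum : (PySem.List.pyRange 0 pattern.sum 1).foldl (fun a i => a * (n - i)) 1
        = nums.prod := foldl_mul_eq_prod_map _ _
    have hA : (pattern.foldl wpStep nums).foldl (fun res v => res * v) 1
        = (pattern.foldl wpStep nums).prod := by
      rw [List.prod_eq_foldl]
    have hdenpos : 0 < (pattern.map wpFact).prod := by
      apply List.prod_pos
      intro x hx
      obtain ⟨mi, _, rfl⟩ := List.mem_map.mp hx
      exact wpFact_pos mi
    rw [hA, hden, hnum, ← hfold,
      PySem.Int.floordiv_eq_ediv_of_pos hdenpos,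
      Int.mul_ediv_cancel _ (ne_of_gt hdenpos)]
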